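-- pv_equiv track=rewrite | github.com/marcantoinec/dojo-hopia | engine.py | compute_new_grid
-- ===== SOURCE A (Python) =====
-- def move_right(row):
--     for k, _ in enumerate(row):
--         current_j = 3 - k
--         if row[current_j] == 0:
--             continue
--         j = current_j
--         while j < 3 and row[j + 1] == 0:
--             j += 1
--         row[j], row[current_j] = row[current_j], row[j]
--     return row
--
-- def transpose(grille):
--     grille_t = []
--     for j in range(4):
--         grille_t.append([grille[i][j] for i in range(4)])
--     return grille_t
--
-- def compute_new_grid(grille, direction):
--     if direction == "up":
--         grille_t = transpose(grille)
--         for i, row in enumerate(grille_t):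
--             grille_t[i] = move_right(row[::-1])[::-1]
--         return transpose(grille_t)
--
--     for i, row in enumerate(grille):
--         if direction == "right":
--             grille[i] = move_right(row)
--         elif direction == "left":
--             grille[i] = move_right(row[::-1])[::-1]
--
--     return grille
-- ===== SOURCE B (Python) =====
-- def _slide(row):
--     nz = [x for x in row if x != 0]
--     return [0] * (4 - len(nz)) + nz
--
-- def compute_new_grid(grille, direction):
--     if direction == "up":
--         cols = [[grille[i][j] for i in range(4)] for j in range(4)]
--         slid = [_slide(col[::-1])[::-1] for col in cols]
--         return [[slid[j][i] for j in range(4)] for i in range(4)]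
--     for i, row in enumerate(grille):
--         if direction == "right":
--             grille[i] = _slide(row)
--         elif direction == "left":
--             grille[i] = _slide(row[::-1])[::-1]
--     return grille
-- ===== Notes on version B (the rewrite author's own statement) =====
-- stated objective: simpler
-- what changed: The per-row gravity simulation (for each cell, a while-loop bubbling the tile rightward through zeros via swaps) is replaced by a single partition pass: keep the nonzero tiles in order and left-pad with zeros ([0]*(4-len(nz))+nz); the reverse/transpose dispatch for left/up is kept.
-- outside the precondition, e.g. on compute_new_grid([[1, 0, 2, 0, 3]], 'right'): A returns [[0, 3, 1, 2, 0]], B returns [[0, 1, 2, 3]]; on compute_new_grid([[]], 'right'): A returns [[]], B returns [[0, 0, 0, 0]]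
import Mathlib
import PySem

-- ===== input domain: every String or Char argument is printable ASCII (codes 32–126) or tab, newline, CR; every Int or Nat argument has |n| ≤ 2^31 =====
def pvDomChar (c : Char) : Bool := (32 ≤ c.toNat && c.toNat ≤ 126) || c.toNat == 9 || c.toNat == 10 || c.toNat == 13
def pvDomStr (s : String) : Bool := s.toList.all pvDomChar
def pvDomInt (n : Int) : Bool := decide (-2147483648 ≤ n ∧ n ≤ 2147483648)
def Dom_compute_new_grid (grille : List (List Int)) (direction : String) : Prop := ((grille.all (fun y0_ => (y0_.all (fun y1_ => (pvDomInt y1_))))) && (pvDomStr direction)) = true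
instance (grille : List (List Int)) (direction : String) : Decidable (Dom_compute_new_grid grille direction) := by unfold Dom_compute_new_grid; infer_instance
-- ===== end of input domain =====

-- B replaces A's per-tile while-loop bubbling by a single partition pass per row (zeros then nonzeros).
-- Equivalence is about the RETURN value only: A mutates grille (and its rows) in place for "right"/"left";
-- B reassigns grille[i] but does not mutate the rows themselves.

-- ===== PORT A =====
-- while j < 3 and row[j + 1] == 0: j += 1   (indices in range on Pre_ rows of length 4; getD default 1 is never hit there)
def pvMrBubble (row : List Int) (j : Nat) : Nat :=
  if h : j < 3 ∧ row.getD (j + 1) 1 = 0 then pvMrBubble row (j + 1) else j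
termination_by 3 - j
decreasing_by omega

-- one iteration of move_right's for-loop (k-th step); index 3-k is a Nat, faithful for k ≤ 3 (Pre_ rows)
def pvMrStep (row : List Int) (k : Nat) : List Int :=
  let cj := 3 - k
  if row.getD cj 1 = 0 then row
  else
    let j := pvMrBubble row cj
    let a := row.getD j 0
    let b := row.getD cj 0
    (row.set j b).set cj a

def pvMoveRight (row : List Int) : List Int :=
  (List.range row.length).foldl pvMrStep row

def pvTranspose (g : List (List Int)) : List (List Int) :=
  (List.range 4).map (fun j => (List.range 4).map (fun i => (g.getD i []).getD j 0))

def compute_new_grid (grille : List (List Int)) (direction : String) : List (List Int) :=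
  if direction = "up" then
    let gt := pvTranspose grille
    let gt2 := (List.range gt.length).foldl
      (fun acc i => acc.set i ((pvMoveRight ((acc.getD i []).reverse)).reverse)) gt
    pvTranspose gt2
  else
    (List.range grille.length).foldl
      (fun acc i =>
        if direction = "right" then acc.set i (pvMoveRight (acc.getD i []))
        else if direction = "left" then acc.set i ((pvMoveRight ((acc.getD i []).reverse)).reverse)
        else acc) grille

-- ===== PORT B =====
def pvSlide (row : List Int) : List Int :=
  let nz := row.filter (fun x => x ≠ 0)
  List.replicate (4 - nz.length) 0 ++ nz

def compute_new_grid_alt (grille : List (List Int)) (direction : String) : List (List Int) :=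
  if direction = "up" then
    let cols := (List.range 4).map (fun j => (List.range 4).map (fun i => (grille.getD i []).getD j 0))
    let slid := cols.map (fun col => (pvSlide col.reverse).reverse)
    (List.range 4).map (fun i => (List.range 4).map (fun j => (slid.getD j []).getD i 0))
  else
    (List.range grille.length).foldl
      (fun acc i =>
        if direction = "right" then acc.set i (pvSlide (acc.getD i []))
        else if direction = "left" then acc.set i ((pvSlide ((acc.getD i []).reverse)).reverse)
        else acc) grille

-- ===== PRECONDITION & SPEC =====
-- Pre_ restricts the three move directions to the game's natural domain of 4-wide rows (4 or more rows
-- for "up"): on narrower rows/grids Python A raises IndexError, and on wider rows A's returned value is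
-- an artefact of Python negative-index wraparound (it also returns length-0 rows unchanged); other
-- direction strings are unrestricted (A returns the grid unchanged).
def Pre_compute_new_grid (grille : List (List Int)) (direction : String) : Prop :=
  (direction = "up" → 4 ≤ grille.length ∧ ∀ row ∈ grille.take 4, 4 ≤ row.length) ∧
  ((direction = "right" ∨ direction = "left") → ∀ row ∈ grille, row.length = 4)
instance (grille : List (List Int)) (direction : String) : Decidable (Pre_compute_new_grid grille direction) := by unfold Pre_compute_new_grid; infer_instance

def pvWitness_compute_new_grid : List (List Int) × String :=
  ([[0, 2, 0, 2], [2, 2, 0, 0], [0, 0, 0, 0], [4, 0, 4, 2]], "right")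

def Spec_compute_new_grid (grille : List (List Int)) (direction : String) (out : List (List Int)) : Prop := out = compute_new_grid_alt grille direction
instance (grille : List (List Int)) (direction : String) (out : List (List Int)) : Decidable (Spec_compute_new_grid grille direction out) := by unfold Spec_compute_new_grid; infer_instance

-- ===== CLAIM (what is proved, stated in full; the proofs are below) =====
def Claim_equal_compute_new_grid : Prop := ∀ (grille : List (List Int)) (direction : String), Dom_compute_new_grid grille direction → Pre_compute_new_grid grille direction → Spec_compute_new_grid grille direction (compute_new_grid grille direction)

-- ===== LEMMAS AND PROOFS =====

-- the per-row core: A's bubbling scan equals B's partition on any length-4 row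
lemma moveRight_eq_slide (row : List Int) (h : row.length = 4) :
    pvMoveRight row = pvSlide row := by
  match row, h with
  | [a, b, c, d], _ =>
    by_cases ha : a = 0 <;> by_cases hb : b = 0 <;> by_cases hc : c = 0 <;> by_cases hd : d = 0 <;>
      simp_all [pvMoveRight, pvMrStep, pvMrBubble, pvSlide, List.range_succ, List.getD]

-- folding "set i (f (getD i))" over all indices is map f
lemma foldl_set_map (f : List Int → List Int) :
    ∀ (pre l : List (List Int)),
      (List.range' pre.length l.length).foldl
        (fun acc i => acc.set i (f (acc.getD i []))) (pre ++ l) = pre ++ l.map f := by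
  intro pre l
  induction l generalizing pre with
  | nil => simp
  | cons x xs ih =>
    have hget : (pre ++ x :: xs).getD pre.length [] = x := by
      simp [List.getD]
    have hset : (pre ++ x :: xs).set pre.length (f x) = (pre ++ [f x]) ++ xs := by
      simp [List.append_assoc]
    have := ih (pre ++ [f x])
    simp only [List.length_append, List.length_cons] at this ⊢
    rw [List.range'_succ, List.foldl_cons, hget, hset]
    simpa [List.append_assoc] using this

lemma foldl_set_map' (f : List Int → List Int) (l : List (List Int)) :
    (List.range l.length).foldl (fun acc i => acc.set i (f (acc.getD i []))) l = l.map f := by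
  have := foldl_set_map f [] l
  simpa [List.range_eq_range'] using this

-- ===== VERDICT (by name: the statement is the Claim_ definition above) =====
theorem compute_new_grid_spec : Claim_equal_compute_new_grid := by
  intro grille direction _ hpre
  unfold Spec_compute_new_grid compute_new_grid compute_new_grid_alt
  rcases hpre with ⟨hup, hrl⟩
  by_cases hu : direction = "up"
  · subst hu
    simp only [reduceIte]
    have hlen4 : ∀ r ∈ pvTranspose grille, r.length = 4 := by
      intro r hr
      simp only [pvTranspose, List.mem_map] at hr
      obtain ⟨j, _, rfl⟩ := hr
      simp
    rw [foldl_set_map' (fun r => (pvMoveRight r.reverse).reverse) (pvTranspose grille)]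
    have hm : (pvTranspose grille).map (fun r => (pvMoveRight r.reverse).reverse)
        = (pvTranspose grille).map (fun r => (pvSlide r.reverse).reverse) :=
      List.map_congr_left fun r hr => by
        rw [moveRight_eq_slide r.reverse (by simp [hlen4 r hr])]
    rw [hm]
    rfl
  · rw [if_neg hu, if_neg hu]
    by_cases hr : direction = "right"
    · subst hr
      simp only [reduceIte]
      rw [foldl_set_map' pvMoveRight grille, foldl_set_map' pvSlide grille]
      exact List.map_congr_left fun r hrr => moveRight_eq_slide r (hrl (Or.inl rfl) r hrr)
    · by_cases hl : direction = "left"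
      · subst hl
        simp only [String.reduceEq, reduceIte]
        rw [foldl_set_map' (fun r => (pvMoveRight r.reverse).reverse) grille]
        rw [foldl_set_map' (fun r => (pvSlide r.reverse).reverse) grille]
        exact List.map_congr_left fun r hrr =>
          by rw [moveRight_eq_slide r.reverse (by simp [hrl (Or.inr rfl) r hrr])]
      · simp [hr, hl]
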